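-- pv_equiv track=rewrite | github.com/chutesai/chutes-miner | src/chutes-miner/chutes_miner/api/k8s/operator.py | _parse_field_selector
-- ===== SOURCE A (Python) =====
-- from typing import Callable, Generator, List, Dict, Any, Optional, Tuple, Union
--
-- def _parse_field_selector(selector: str) -> Dict[str, str]:
--     """Parse field selector string into dictionary."""
--     fields = {}
--     if selector:
--         for pair in selector.split(","):
--             if "=" in pair:
--                 key, value = pair.split("=", 1)
--                 fields[key.strip()] = value.strip()
--     return fields
-- ===== SOURCE B (Python) =====
-- def _parse_field_selector(selector: str) -> dict:
--     """Parse field selector string into dictionary (single character pass)."""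
--     fields = {}
--     key = None
--     buf = []
--     for ch in selector:
--         if ch == ',':
--             if key is not None:
--                 fields[''.join(key).strip()] = ''.join(buf).strip()
--             key, buf = None, []
--         elif ch == '=' and key is None:
--             key, buf = buf, []
--         else:
--             buf.append(ch)
--     if key is not None:
--         fields[''.join(key).strip()] = ''.join(buf).strip()
--     return fields
-- ===== Notes on version B (the rewrite author's own statement) =====
-- stated objective: alternative
-- what changed: Replaced the split(',')-then-split('=',1) nested passes and the truthiness guard by a single left-to-right character scan with a key/value buffer state machine that flushes into the dict at each comma.
import Mathlib
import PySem

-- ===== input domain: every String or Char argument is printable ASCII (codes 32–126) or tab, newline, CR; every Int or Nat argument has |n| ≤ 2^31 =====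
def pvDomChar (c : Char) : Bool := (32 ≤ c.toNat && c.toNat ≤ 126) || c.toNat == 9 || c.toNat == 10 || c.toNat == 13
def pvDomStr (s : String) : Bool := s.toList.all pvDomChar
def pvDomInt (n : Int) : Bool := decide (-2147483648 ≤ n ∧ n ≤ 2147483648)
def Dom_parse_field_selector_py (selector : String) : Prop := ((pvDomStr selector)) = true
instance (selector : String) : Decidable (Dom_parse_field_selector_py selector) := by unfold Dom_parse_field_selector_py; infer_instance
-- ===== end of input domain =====

-- B replaces A's split(',') / split('=',1) nested passes by one character scan with a
-- key/value buffer state machine (objective: alternative; same asymptotic cost).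

-- ===== PORT A =====
def parse_field_selector_py (selector : String) : List (String × String) :=
  let fields : PySem.Dict String String := PySem.Dict.empty
  let fields :=
    if selector ≠ "" then
      (PySem.Chars.splitOn selector.toList [',']).foldl (fun fields pair =>
        if PySem.Chars.isIn ['='] pair then
          match PySem.Chars.splitOnMax pair ['='] 1 with
          | [key, value] =>
              fields.insert (PySem.Str.strip (String.ofList key)) (PySem.Str.strip (String.ofList value))
          | _ => fields
        else fields) fields
    else fields
  fields.items

-- ===== PORT B =====
def pfsFlush (key? : Option (List Char)) (buf : List Char)
    (fields : PySem.Dict String String) : PySem.Dict String String :=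
  match key? with
  | some key => fields.insert (PySem.Str.strip (String.ofList key)) (PySem.Str.strip (String.ofList buf))
  | none => fields

def pfsLoop : List Char → Option (List Char) → List Char → PySem.Dict String String → PySem.Dict String String
  | [], key?, buf, fields => pfsFlush key? buf fields
  | c :: rest, key?, buf, fields =>
    if c = ',' then pfsLoop rest none [] (pfsFlush key? buf fields)
    else if c = '=' ∧ key? = none then pfsLoop rest (some buf) [] fields
    else pfsLoop rest key? (buf ++ [c]) fields

def parse_field_selector_py_alt (selector : String) : List (String × String) :=
  (pfsLoop selector.toList none [] PySem.Dict.empty).items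

-- ===== PRECONDITION & SPEC =====
def Spec_parse_field_selector_py (selector : String) (out : List (String × String)) : Prop := out = parse_field_selector_py_alt selector
instance (selector : String) (out : List (String × String)) : Decidable (Spec_parse_field_selector_py selector out) := by unfold Spec_parse_field_selector_py; infer_instance

-- ===== CLAIM (what is proved, stated in full; the proofs are below) =====
def Claim_equal_parse_field_selector_py : Prop := ∀ (selector : String), Dom_parse_field_selector_py selector → Spec_parse_field_selector_py selector (parse_field_selector_py selector)

-- ===== LEMMAS AND PROOFS =====

-- A's fold body, named for the proofs.
def pfsStepA (fields : PySem.Dict String String) (pair : List Char) : PySem.Dict String String :=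
  if PySem.Chars.isIn ['='] pair then
    match PySem.Chars.splitOnMax pair ['='] 1 with
    | [key, value] =>
        fields.insert (PySem.Str.strip (String.ofList key)) (PySem.Str.strip (String.ofList value))
    | _ => fields
  else fields

-- abstract comma split
def pfsSegs (pre : List Char) : List Char → List (List Char)
  | [] => [pre]
  | c :: rest => if c = ',' then pre :: pfsSegs [] rest else pfsSegs (pre ++ [c]) rest

-- abstract split at first '=' (maxsplit 1)
def pfsEqsplit (pre : List Char) : List Char → List (List Char)
  | [] => [pre]
  | c :: rest => if c = '=' then [pre, rest] else pfsEqsplit (pre ++ [c]) rest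

theorem splitOn_go_comma (fuel : Nat) : ∀ (l cur : List Char) (acc : List (List Char)),
    l.length < fuel →
    PySem.Chars.splitOn.go [','] fuel l cur acc = acc.reverse ++ pfsSegs cur.reverse l := by
  induction fuel with
  | zero => intro l cur acc h; omega
  | succ n ih =>
    intro l cur acc h
    cases l with
    | nil => simp [PySem.Chars.splitOn.go, pfsSegs]
    | cons c rest =>
      simp only [PySem.Chars.splitOn.go, List.isPrefixOf, pfsSegs]
      by_cases hc : c = ','
      · subst hc
        simp [ih rest [] (cur.reverse :: acc) (by simp at h; omega)]
      · simp [hc, Ne.symm hc, ih rest (c :: cur) acc (by simp at h; omega)]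

theorem splitOn_comma (l : List Char) :
    PySem.Chars.splitOn l [','] = pfsSegs [] l := by
  have := splitOn_go_comma (l.length + 1) l [] [] (by omega)
  simpa [PySem.Chars.splitOn] using this

theorem splitOnMax_go_zero (fuel : Nat) (l cur : List Char) (acc : List (List Char)) :
    PySem.Chars.splitOnMax.go ['='] fuel 0 l cur acc = acc.reverse ++ [cur.reverse ++ l] := by
  cases fuel with
  | zero => simp [PySem.Chars.splitOnMax.go]
  | succ n => cases l <;> simp [PySem.Chars.splitOnMax.go]

theorem splitOnMax_go_eq (fuel : Nat) : ∀ (l cur : List Char) (acc : List (List Char)),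
    l.length < fuel →
    PySem.Chars.splitOnMax.go ['='] fuel 1 l cur acc = acc.reverse ++ pfsEqsplit cur.reverse l := by
  induction fuel with
  | zero => intro l cur acc h; omega
  | succ n ih =>
    intro l cur acc h
    cases l with
    | nil => simp [PySem.Chars.splitOnMax.go, pfsEqsplit]
    | cons c rest =>
      simp only [PySem.Chars.splitOnMax.go, List.isPrefixOf, pfsEqsplit]
      by_cases hc : c = '='
      · subst hc
        simp [splitOnMax_go_zero]
      · simp [hc, Ne.symm hc, ih rest (c :: cur) acc (by simp at h; omega)]

theorem splitOnMax_eq1 (l : List Char) :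
    PySem.Chars.splitOnMax l ['='] 1 = pfsEqsplit [] l := by
  have := splitOnMax_go_eq (l.length + 1) l [] [] (by omega)
  simpa [PySem.Chars.splitOnMax] using this

theorem isIn_eq_char (l : List Char) :
    PySem.Chars.isIn ['='] l = decide ('=' ∈ l) := by
  by_cases h : '=' ∈ l
  · simp [h, PySem.Chars.isIn_iff_infix, (List.singleton_infix_iff '=' l).2 h]
  · simp [h]
    rw [PySem.Chars.isIn_eq_false_iff]
    exact fun hinf => h ((List.singleton_infix_iff '=' l).1 hinf)

theorem eqsplit_key (k buf : List Char) (hk : '=' ∉ k) : ∀ pre,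
    pfsEqsplit pre (k ++ '=' :: buf) = [pre ++ k, buf] := by
  induction k with
  | nil => intro pre; simp [pfsEqsplit]
  | cons c rest ih =>
    intro pre
    simp only [List.mem_cons, not_or] at hk
    simp [pfsEqsplit, Ne.symm hk.1, ih hk.2]

def pfsRestore (key? : Option (List Char)) (buf : List Char) : List Char :=
  match key? with
  | some k => k ++ '=' :: buf
  | none => buf

theorem flush_eq_stepA (key? : Option (List Char)) (buf : List Char) (d : PySem.Dict String String)
    (hk : ∀ k, key? = some k → '=' ∉ k) (hb : key? = none → '=' ∉ buf) :
    pfsFlush key? buf d = pfsStepA d (pfsRestore key? buf) := by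
  cases key? with
  | none => simp [pfsFlush, pfsStepA, pfsRestore, isIn_eq_char, hb rfl]
  | some k =>
    have hk' := hk k rfl
    simp [pfsFlush, pfsStepA, pfsRestore, isIn_eq_char, splitOnMax_eq1, eqsplit_key k buf hk' []]

theorem pfsLoop_eq_foldl : ∀ (l : List Char) (key? : Option (List Char)) (buf : List Char)
    (d : PySem.Dict String String),
    (∀ k, key? = some k → '=' ∉ k) → (key? = none → '=' ∉ buf) →
    pfsLoop l key? buf d = (pfsSegs (pfsRestore key? buf) l).foldl pfsStepA d := by
  intro l
  induction l with
  | nil =>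
    intro key? buf d hk hb
    simp [pfsLoop, pfsSegs, flush_eq_stepA key? buf d hk hb]
  | cons c rest ih =>
    intro key? buf d hk hb
    by_cases hc : c = ','
    · subst hc
      rw [pfsLoop, if_pos rfl,
        ih none [] (pfsFlush key? buf d) (by simp) (by simp),
        flush_eq_stepA key? buf d hk hb]
      simp [pfsSegs, pfsRestore]
    · by_cases he : c = '=' ∧ key? = none
      · obtain ⟨he1, he2⟩ := he
        subst he1; subst he2
        rw [pfsLoop, if_neg (by simp [hc]), if_pos ⟨rfl, rfl⟩,
          ih (some buf) [] d (fun k hkk => by cases hkk; exact hb rfl) (by simp)]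
        simp [pfsSegs, pfsRestore, hc]
      · rw [pfsLoop, if_neg (by simp [hc]), if_neg he,
          ih key? (buf ++ [c]) d hk ?_]
        · cases key? with
          | none => simp [pfsSegs, pfsRestore, hc]
          | some k => simp [pfsSegs, pfsRestore, hc]
        · intro hnone
          subst hnone
          have hce : c ≠ '=' := by intro hc'; exact he ⟨hc', rfl⟩
          simp [hb rfl, Ne.symm hce]

-- ===== VERDICT (by name: the statement is the Claim_ definition above) =====
theorem parse_field_selector_py_spec : Claim_equal_parse_field_selector_py := by
  intro selector _
  unfold Spec_parse_field_selector_py parse_field_selector_py parse_field_selector_py_alt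
  dsimp only
  rw [pfsLoop_eq_foldl selector.toList none [] PySem.Dict.empty (by simp) (by simp)]
  by_cases hs : selector = ""
  · subst hs
    simp [pfsRestore, pfsSegs, pfsStepA, isIn_eq_char]
  · rw [if_pos hs, splitOn_comma]
    rfl
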